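-- pv_equiv track=rewrite | github.com/Kellyyzy888/BachTransformer | sample/decode_m4.py | _parse_progression
-- ===== SOURCE A (Python) =====
-- def _parse_progression(
--     raw: str,
--     piece_length: int,
-- ) -> list[str]:
--     """Turn 'I V I vi | IV V I' into a length-`piece_length` RN list.
--
--     Rules:
--       - tokens split on whitespace and '|'
--       - each token occupies (piece_length // n_tokens) 16th-notes, with
--         the remainder going to the last token to preserve length exactly
--       - unknown symbols stay as-is and will map to RN_OTHER at encode time
--     """
--     tokens = [t for t in raw.replace("|", " ").split() if t]
--     if not tokens:
--         raise ValueError("empty chord progression")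
--     n = len(tokens)
--     base = piece_length // n
--     extra = piece_length - base * n
--     out: list[str] = []
--     for i, tok in enumerate(tokens):
--         k = base + (extra if i == n - 1 else 0)
--         out.extend([tok] * k)
--     assert len(out) == piece_length
--     return out
-- ===== SOURCE B (Python) =====
-- def _parse_progression(
--     raw: str,
--     piece_length: int,
-- ) -> list[str]:
--     """Position-indexed rewrite: assign each 16th-note slot i to its block."""
--     tokens = [t for t in raw.replace("|", " ").split() if t]
--     if not tokens:
--         raise ValueError("empty chord progression")
--     n = len(tokens)
--     base = piece_length // n
--     if base == 0:
--         return [tokens[-1]] * piece_length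
--     return [tokens[min(i // base, n - 1)] for i in range(piece_length)]
-- ===== Notes on version B (the rewrite author's own statement) =====
-- stated objective: alternative
-- what changed: Instead of looping over tokens and extending the output with replicated blocks (with an explicit remainder for the last token), B iterates over output positions and computes each slot's token by index arithmetic (min(i // base, n - 1)), with a base == 0 case giving all slots to the last token.
import Mathlib
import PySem

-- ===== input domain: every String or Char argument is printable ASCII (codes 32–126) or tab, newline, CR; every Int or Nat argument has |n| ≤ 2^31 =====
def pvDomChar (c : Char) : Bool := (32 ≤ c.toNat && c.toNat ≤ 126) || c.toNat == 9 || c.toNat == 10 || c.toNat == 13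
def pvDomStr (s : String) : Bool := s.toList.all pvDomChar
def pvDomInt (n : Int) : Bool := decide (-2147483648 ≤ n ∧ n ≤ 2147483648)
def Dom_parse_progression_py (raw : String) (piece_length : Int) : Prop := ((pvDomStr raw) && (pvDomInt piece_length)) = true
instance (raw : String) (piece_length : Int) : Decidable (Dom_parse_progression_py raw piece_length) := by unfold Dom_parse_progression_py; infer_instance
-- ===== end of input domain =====

-- B replaces A's per-token replication loop (with an explicit remainder for the last
-- token) by a position-indexed construction: slot i gets tokens[min(i // base, n-1)].
-- Equivalence is about the return value; neither version mutates its arguments.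

-- ===== PORT A =====
-- Where Python A raises (ValueError on an empty token list, AssertionError when the
-- assert fails, i.e. piece_length < 0) the port returns []; Pre_ excludes those inputs.
def parse_progression_py (raw : String) (piece_length : Int) : List String :=
  let tokens := (PySem.Str.split₀ (PySem.Str.replace raw "|" " ")).filter (fun t => t != "")
  if tokens = [] then []          -- raise ValueError("empty chord progression")
  else
    let n : Int := tokens.length
    let base := PySem.Int.floordiv piece_length n
    let extra := piece_length - base * n
    let out := (PySem.List.enumerate tokens).foldl
      (fun out p => out ++ List.replicate (base + if p.1 = n - 1 then extra else 0).toNat p.2) []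
    if (out.length : Int) = piece_length then out else []   -- assert len(out) == piece_length

-- ===== PORT B =====
def parse_progression_py_alt (raw : String) (piece_length : Int) : List String :=
  let tokens := (PySem.Str.split₀ (PySem.Str.replace raw "|" " ")).filter (fun t => t != "")
  if tokens = [] then []          -- raise ValueError("empty chord progression")
  else
    let n : Int := tokens.length
    let base := PySem.Int.floordiv piece_length n
    if base = 0 then
      List.replicate piece_length.toNat (PySem.List.pyGetD tokens (-1) "")
    else
      (PySem.List.pyRange 0 piece_length 1).map
        (fun i => PySem.List.pyGetD tokens (min (PySem.Int.floordiv i base) (n - 1)) "")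

-- ===== PRECONDITION & SPEC =====
-- Pre_ excludes exactly the inputs where A raises: ValueError when the progression has
-- no tokens, and AssertionError when piece_length < 0 (the built list can never have
-- negative length).
def Pre_parse_progression_py (raw : String) (piece_length : Int) : Prop :=
  (PySem.Str.split₀ (PySem.Str.replace raw "|" " ")).filter (fun t => t != "") ≠ [] ∧
    0 ≤ piece_length

instance (raw : String) (piece_length : Int) : Decidable (Pre_parse_progression_py raw piece_length) := by
  unfold Pre_parse_progression_py; infer_instance

def pvWitness_parse_progression_py : String × Int := ("I V I vi | IV V I", 32)

def Spec_parse_progression_py (raw : String) (piece_length : Int) (out : List String) : Prop := out = parse_progression_py_alt raw piece_length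
instance (raw : String) (piece_length : Int) (out : List String) : Decidable (Spec_parse_progression_py raw piece_length out) := by unfold Spec_parse_progression_py; infer_instance

-- ===== CLAIM (what is proved, stated in full; the proofs are below) =====
def Claim_equal_parse_progression_py : Prop := ∀ (raw : String) (piece_length : Int), Dom_parse_progression_py raw piece_length → Pre_parse_progression_py raw piece_length → Spec_parse_progression_py raw piece_length (parse_progression_py raw piece_length)

-- ===== LEMMAS AND PROOFS =====

-- A's loop, flattened: each token contributes `base.toNat` copies except the last,
-- which contributes `(base+extra).toNat`.
lemma pvAFlat (base extra : Int) :
    ∀ (ts : List String) (h : ts ≠ []) (s t : Int), t = s + ts.length - 1 →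
      (PySem.List.enumerate ts s).flatMap
        (fun p => List.replicate (base + if p.1 = t then extra else 0).toNat p.2)
      = ts.dropLast.flatMap (List.replicate base.toNat)
        ++ List.replicate (base + extra).toNat (ts.getLast h) := by
  intro ts
  induction ts with
  | nil => intro h; exact absurd rfl h
  | cons a rest ih =>
    intro _ s t ht
    cases rest with
    | nil =>
      have hst : s = t := by simp at ht; omega
      simp [PySem.List.enumerate_cons, PySem.List.enumerate_nil, hst]
    | cons b rest' =>
      have hne : (b :: rest') ≠ [] := by simp
      have hs : s ≠ t := by
        simp only [List.length_cons] at ht; push_cast at ht; omega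
      have htl : t = (s + 1) + ((b :: rest').length : Int) - 1 := by
        simp only [List.length_cons] at ht ⊢; push_cast at ht ⊢; omega
      rw [PySem.List.enumerate_cons, List.flatMap_cons, if_neg hs, add_zero,
          ih hne (s + 1) t htl,
          List.dropLast_cons_of_ne_nil hne, List.flatMap_cons,
          List.getLast_cons hne, List.append_assoc]

lemma pvLenFlatRep (k : Nat) : ∀ (xs : List String),
    (xs.flatMap (List.replicate k)).length = k * xs.length := by
  intro xs
  induction xs with
  | nil => simp
  | cons x xs ih => simp [ih]; ring

lemma pvGetFlatRep (b : Nat) (hb : 0 < b) :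
    ∀ (xs : List String) (i : Nat), i < b * xs.length →
      (xs.flatMap (List.replicate b))[i]? = xs[i / b]? := by
  intro xs
  induction xs with
  | nil => intro i hi; simp at hi
  | cons x xs ih =>
    intro i hi
    simp only [List.flatMap_cons]
    by_cases hib : i < b
    · rw [List.getElem?_append_left (by simpa using hib)]
      rw [Nat.div_eq_of_lt hib]
      simp [List.getElem?_replicate, hib]
    · push_neg at hib
      rw [List.getElem?_append_right (by simpa using hib)]
      simp only [List.length_replicate]
      have hi' : i - b < b * xs.length := by
        simp only [List.length_cons] at hi
        have : b * (xs.length + 1) = b * xs.length + b := by ring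
        omega
      rw [ih (i - b) hi']
      have hdiv : i / b = (i - b) / b + 1 := by
        have h1 : i = (i - b) + b := by omega
        conv_lhs => rw [h1]
        rw [Nat.add_div_right _ hb]
      rw [hdiv]
      simp

-- getElem? of the A-side normal form, for base > 0
lemma pvANF_get (ts : List String) (h : ts ≠ []) (b e i : Nat) (hb : 0 < b)
    (he : e < ts.length) (hi : i < b * ts.length + e) :
    (ts.dropLast.flatMap (List.replicate b) ++ List.replicate (b + e) (ts.getLast h))[i]?
      = ts[min (i / b) (ts.length - 1)]? := by
  have hN : 0 < ts.length := List.length_pos_of_ne_nil h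
  have hsplit : b * ts.length = b * (ts.length - 1) + b := by
    obtain ⟨m, hm⟩ : ∃ m, ts.length = m + 1 := ⟨ts.length - 1, by omega⟩
    rw [hm, Nat.mul_succ]; simp
  have hcomm : (ts.length - 1) * b = b * (ts.length - 1) := Nat.mul_comm _ _
  have hlen : (ts.dropLast.flatMap (List.replicate b)).length = b * (ts.length - 1) := by
    rw [pvLenFlatRep]; simp [List.length_dropLast]
  by_cases hfront : i < b * (ts.length - 1)
  · rw [List.getElem?_append_left (by omega)]
    rw [pvGetFlatRep b hb _ i (by rw [List.length_dropLast]; omega)]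
    have hdivlt : i / b < ts.length - 1 := by
      rw [Nat.div_lt_iff_lt_mul hb]; omega
    rw [Nat.min_eq_left (by omega)]
    rw [List.getElem?_eq_getElem (by rw [List.length_dropLast]; omega),
        List.getElem?_eq_getElem (by omega)]
    exact congrArg some (List.getElem_dropLast _)
  · push_neg at hfront
    rw [List.getElem?_append_right (by omega)]
    have hdivge : ts.length - 1 ≤ i / b := by
      rw [Nat.le_div_iff_mul_le hb]; omega
    rw [Nat.min_eq_right (by omega)]
    rw [List.getElem?_replicate, if_pos (by rw [hlen]; omega)]
    rw [List.getElem?_eq_getElem (by omega)]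
    exact congrArg some (List.getLast_eq_getElem h)

theorem parse_progression_py_spec : Claim_equal_parse_progression_py := by
  intro raw pl _ hPre
  obtain ⟨hts, hpl⟩ := hPre
  unfold Spec_parse_progression_py parse_progression_py parse_progression_py_alt
  simp only []
  set ts := (PySem.Str.split₀ (PySem.Str.replace raw "|" " ")).filter (fun t => t != "") with hts_def
  rw [if_neg hts, if_neg hts]
  set N := ts.length with hN_def
  have hN : 0 < N := List.length_pos_of_ne_nil hts
  set L := pl.toNat with hL_def
  have hplL : pl = (L : Int) := (Int.toNat_of_nonneg hpl).symm
  -- the Int base and extra in Nat terms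
  have hbase : PySem.Int.floordiv pl (N : Int) = ((L / N : Nat) : Int) := by
    rw [hplL]; exact PySem.Int.floordiv_natCast L N
  set b := L / N with hb_def
  set e := L % N with he_def
  have hdm : N * b + e = L := Nat.div_add_mod L N
  have hextra : pl - PySem.Int.floordiv pl (N : Int) * (N : Int) = ((e : Nat) : Int) := by
    rw [hbase, hplL]
    have h2 : (N : Int) * (b : Int) + (e : Int) = (L : Int) := by exact_mod_cast hdm
    linear_combination -h2
  -- A's loop in normal form
  have hflat := pvAFlat ((b : Nat) : Int) ((e : Nat) : Int) ts hts 0 ((N : Int) - 1)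
    (by omega)
  have hloop :
      (PySem.List.enumerate ts).foldl
        (fun out p => out ++ List.replicate
          (PySem.Int.floordiv pl (N : Int)
            + if p.1 = (N : Int) - 1 then pl - PySem.Int.floordiv pl (N : Int) * (N : Int) else 0).toNat p.2) []
      = ts.dropLast.flatMap (List.replicate b)
        ++ List.replicate (b + e) (ts.getLast hts) := by
    have h1 : ((b : Nat) : Int).toNat = b := Int.toNat_natCast b
    have h2 : (((b : Nat) : Int) + ((e : Nat) : Int)).toNat = b + e := by
      rw [← Nat.cast_add]; exact Int.toNat_natCast _
    rw [PySem.List.foldl_append_eq_flatMap, List.nil_append, hextra, hbase, hflat, h1, h2]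
  have hlenout : (ts.dropLast.flatMap (List.replicate b)
        ++ List.replicate (b + e) (ts.getLast hts)).length = L := by
    rw [List.length_append, pvLenFlatRep, List.length_replicate, List.length_dropLast]
    have hx : (ts.length - 1) * b = ts.length * b - b := by rw [Nat.sub_one_mul]
    have hc : b * (ts.length - 1) = (ts.length - 1) * b := Nat.mul_comm _ _
    have hy : b ≤ ts.length * b := Nat.le_mul_of_pos_left b (by omega)
    have hdm' : ts.length * b + e = L := by rw [← hN_def]; exact hdm
    omega
  rw [hloop]
  rw [if_pos (by rw [hlenout]; omega)]
  rw [hbase]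
  by_cases hb0 : b = 0
  · -- piece_length < n: everything goes to the last token
    rw [if_pos (by rw [hb0]; simp)]
    have hLe : e = L := by
      have : L < N := by
        by_contra hcon
        push_neg at hcon
        have : 1 ≤ L / N := (Nat.one_le_div_iff hN).mpr hcon
        omega
      simp [he_def, Nat.mod_eq_of_lt this]
    have hfront : ts.dropLast.flatMap (List.replicate b) = [] := by
      rw [hb0]; simp [List.flatMap_eq_nil_iff]
    rw [hfront, List.nil_append, hb0, Nat.zero_add, hLe]
    rw [PySem.List.pyGetD_neg_one _ _ hts]
  · -- base > 0: compare element by element with the position-indexed list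
    have hbpos : 0 < b := Nat.pos_of_ne_zero hb0
    rw [if_neg (by simp [Int.natCast_eq_zero]; omega)]
    have hepos : e < N := Nat.mod_lt _ hN
    apply List.ext_getElem?
    intro i
    have hlenB : ((PySem.List.pyRange 0 pl 1).map
        (fun i => PySem.List.pyGetD ts (min (PySem.Int.floordiv i ((b:Nat):Int)) ((N : Int) - 1)) "")).length = L := by
      rw [List.length_map, PySem.List.length_pyRange_one]
      omega
    have hdm2 : b * ts.length + e = L := by rw [Nat.mul_comm, ← hN_def]; exact hdm
    by_cases hiL : i < L
    · rw [pvANF_get ts hts b e i hbpos hepos (by omega)]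
      rw [hplL]
      rw [PySem.List.getElem?_map_pyRange_zero _ _ _ (by omega)]
      have hfd : PySem.Int.floordiv ((i : Nat) : Int) ((b : Nat) : Int) = ((i / b : Nat) : Int) :=
        PySem.Int.floordiv_natCast i b
      rw [hfd]
      have hmin : min ((i / b : Nat) : Int) ((N : Int) - 1) = (((min (i / b) (N - 1)) : Nat) : Int) := by
        push_cast; omega
      rw [hmin, PySem.List.pyGetD_natCast]
      have hminlt : min (i / b) (N - 1) < N := by omega
      rw [List.getElem?_eq_getElem hminlt, List.getD_eq_getElem _ _ hminlt]
    · push_neg at hiL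
      rw [List.getElem?_eq_none (by rw [hlenout]; omega),
          List.getElem?_eq_none (by rw [hlenB]; omega)]
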